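-- pv_equiv track=rewrite | github.com/Luminous-Dynamics/kosmic-lab-research | experiments/llm_k_index/run_experiments.py | generate_length_prompts
-- ===== SOURCE A (Python) =====
-- from typing import Any, Dict, List, Optional, Tuple
--
-- def generate_length_prompts(n_samples: int, length_tokens: int) -> List[str]:
--     """Generate prompts of approximately specified length."""
--     base_prompts = [
--         "Explain the concept of {topic} in detail.",
--         "What are the key aspects of {topic}?",
--         "Describe {topic} thoroughly.",
--         "Provide a comprehensive overview of {topic}.",
--         "Discuss {topic} from multiple perspectives.",
--     ]
--
--     topics = [
--         "consciousness", "quantum mechanics", "evolution", "democracy",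
--         "artificial intelligence", "climate change", "economics", "philosophy",
--         "mathematics", "art history", "music theory", "linguistics",
--         "neuroscience", "astronomy", "chemistry", "psychology",
--     ]
--
--     filler_phrases = [
--         "Consider various viewpoints.",
--         "Include historical context.",
--         "Explain the underlying principles.",
--         "Discuss practical applications.",
--         "Address common misconceptions.",
--     ]
--
--     prompts = []
--     for i in range(n_samples):
--         base = base_prompts[i % len(base_prompts)]
--         topic = topics[i % len(topics)]
--         prompt = base.format(topic=topic)
--
--         # Add filler to reach desired length
--         while len(prompt.split()) < length_tokens:
--             prompt += " " + filler_phrases[i % len(filler_phrases)]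
--
--         # Truncate if too long
--         words = prompt.split()[:length_tokens]
--         prompts.append(" ".join(words))
--
--     return prompts
-- ===== SOURCE B (Python) =====
-- from typing import List
--
-- def generate_length_prompts(n_samples: int, length_tokens: int) -> List[str]:
--     """Generate prompts of approximately specified length."""
--     base_prompts = [
--         "Explain the concept of {topic} in detail.",
--         "What are the key aspects of {topic}?",
--         "Describe {topic} thoroughly.",
--         "Provide a comprehensive overview of {topic}.",
--         "Discuss {topic} from multiple perspectives.",
--     ]
--
--     topics = [
--         "consciousness", "quantum mechanics", "evolution", "democracy",
--         "artificial intelligence", "climate change", "economics", "philosophy",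
--         "mathematics", "art history", "music theory", "linguistics",
--         "neuroscience", "astronomy", "chemistry", "psychology",
--     ]
--
--     filler_phrases = [
--         "Consider various viewpoints.",
--         "Include historical context.",
--         "Explain the underlying principles.",
--         "Discuss practical applications.",
--         "Address common misconceptions.",
--     ]
--
--     def build(i: int) -> str:
--         words = base_prompts[i % 5].format(topic=topics[i % 16]).split()
--         if len(words) < length_tokens:
--             filler_words = filler_phrases[i % 5].split()
--             # number of whole filler phrases needed to reach length_tokens words
--             words = words + filler_words * -((len(words) - length_tokens) // len(filler_words))
--         return " ".join(words[:length_tokens])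
--
--     return [build(i) for i in range(n_samples)]
-- ===== Notes on version B (the rewrite author's own statement) =====
-- stated objective: faster
-- what changed: Instead of repeatedly appending a filler phrase and re-splitting the ever-growing prompt string (quadratic in the target length), B splits the base prompt once, computes the number of needed filler phrases by one ceiling division, builds the word list in one concatenation and joins the truncation.
import Mathlib
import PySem

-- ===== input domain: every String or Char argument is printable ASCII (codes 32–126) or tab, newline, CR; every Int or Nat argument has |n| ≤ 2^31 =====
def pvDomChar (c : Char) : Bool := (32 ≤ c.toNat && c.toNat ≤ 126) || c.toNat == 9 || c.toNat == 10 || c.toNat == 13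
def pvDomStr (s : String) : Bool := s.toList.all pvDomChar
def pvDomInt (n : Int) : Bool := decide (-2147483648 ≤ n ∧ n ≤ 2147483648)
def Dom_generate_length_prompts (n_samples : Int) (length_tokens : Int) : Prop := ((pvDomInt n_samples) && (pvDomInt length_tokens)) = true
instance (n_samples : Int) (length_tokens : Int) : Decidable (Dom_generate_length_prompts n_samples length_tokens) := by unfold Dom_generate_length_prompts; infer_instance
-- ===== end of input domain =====

-- B replaces A's append-and-resplit filler loop (quadratic in the target word count) by
-- one ceiling division that computes the filler count, building each word list once (faster).


-- ===== PORT A =====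
-- the three literal lists shared by both Pythons
def pvBasePrompts : List String :=
  ["Explain the concept of {topic} in detail.",
   "What are the key aspects of {topic}?",
   "Describe {topic} thoroughly.",
   "Provide a comprehensive overview of {topic}.",
   "Discuss {topic} from multiple perspectives."]

def pvTopics : List String :=
  ["consciousness", "quantum mechanics", "evolution", "democracy",
   "artificial intelligence", "climate change", "economics", "philosophy",
   "mathematics", "art history", "music theory", "linguistics",
   "neuroscience", "astronomy", "chemistry", "psychology"]

def pvFillerPhrases : List String :=
  ["Consider various viewpoints.",
   "Include historical context.",
   "Explain the underlying principles.",
   "Discuss practical applications.",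
   "Address common misconceptions."]

-- A's while loop: `while len(prompt.split()) < length_tokens: prompt += " " + filler`.
-- The fuel `length_tokens.toNat` only makes the recursion total: each pass appends a
-- non-empty filler phrase (≥ 1 word) while the word count is below length_tokens, so at
-- most length_tokens passes can ever run; the guard itself is Python's loop condition.
def pvA_fill (length_tokens : Int) (filler : String) : Nat → String → String
  | 0, prompt => prompt
  | fuel + 1, prompt =>
    if ((PySem.Str.split₀ prompt).length : Int) < length_tokens then
      pvA_fill length_tokens filler fuel (prompt ++ " " ++ filler)
    else prompt

-- one iteration of A's for-body; `base.format(topic=topic)` is exact as replacing the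
-- single field "{topic}" (the templates contain no other braces); the `xs[i % len(xs)]`
-- lookups are always in range (0 ≤ i % len < len), so pyGetD with default "" is exact
def pvA_make (length_tokens : Int) (i : Int) : String :=
  let base := PySem.List.pyGetD pvBasePrompts (PySem.Int.mod i 5) ""
  let topic := PySem.List.pyGetD pvTopics (PySem.Int.mod i 16) ""
  let filler := PySem.List.pyGetD pvFillerPhrases (PySem.Int.mod i 5) ""
  let prompt := pvA_fill length_tokens filler length_tokens.toNat
                  (PySem.Str.replace base "{topic}" topic)
  PySem.Str.join " " (PySem.List.slice (PySem.Str.split₀ prompt) none (some length_tokens))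

def generate_length_prompts (n_samples : Int) (length_tokens : Int) : List String :=
  (PySem.List.pyRange 0 n_samples 1).foldl
    (fun prompts i => prompts ++ [pvA_make length_tokens i]) []

-- ===== PORT B =====
-- one call of Source B's `build(i)`: words are split once, the filler count is the single
-- ceiling division -((len(words) - length_tokens) // len(filler_words)), and the word
-- list is assembled by one concatenation (list * int = flatten ∘ replicate)
def pvB_build (length_tokens : Int) (i : Int) : String :=
  let words0 := PySem.Str.split₀
    (PySem.Str.replace (PySem.List.pyGetD pvBasePrompts (PySem.Int.mod i 5) "")
      "{topic}" (PySem.List.pyGetD pvTopics (PySem.Int.mod i 16) ""))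
  let words :=
    if (words0.length : Int) < length_tokens then
      let filler_words := PySem.Str.split₀ (PySem.List.pyGetD pvFillerPhrases (PySem.Int.mod i 5) "")
      words0 ++ (List.replicate
        (-(PySem.Int.floordiv ((words0.length : Int) - length_tokens) (filler_words.length : Int))).toNat
        filler_words).flatten
    else words0
  PySem.Str.join " " (PySem.List.slice words none (some length_tokens))

def generate_length_prompts_alt (n_samples : Int) (length_tokens : Int) : List String :=
  (PySem.List.pyRange 0 n_samples 1).map (pvB_build length_tokens)

-- ===== PRECONDITION & SPEC =====
def Spec_generate_length_prompts (n_samples : Int) (length_tokens : Int) (out : List String) : Prop := out = generate_length_prompts_alt n_samples length_tokens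
instance (n_samples : Int) (length_tokens : Int) (out : List String) : Decidable (Spec_generate_length_prompts n_samples length_tokens out) := by unfold Spec_generate_length_prompts; infer_instance

-- ===== CLAIM (what is proved, stated in full; the proofs are below) =====
def Claim_equal_generate_length_prompts : Prop := ∀ (n_samples : Int) (length_tokens : Int), Dom_generate_length_prompts n_samples length_tokens → Spec_generate_length_prompts n_samples length_tokens (generate_length_prompts n_samples length_tokens)

-- ===== LEMMAS AND PROOFS =====

theorem pv_go_acc (s : List Char) (cur : List Char) (acc : List (List Char)) :
    PySem.Chars.split₀.go s cur acc = acc.reverse ++ PySem.Chars.split₀.go s cur [] := by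
  induction s generalizing cur acc with
  | nil => simp only [PySem.Chars.split₀.go]; split_ifs <;> simp
  | cons c rest ih =>
    simp only [PySem.Chars.split₀.go]
    split_ifs with h1 h2
    · rw [ih [] acc]
    · rw [ih [] (cur.reverse :: acc), ih [] [cur.reverse]]; simp
    · rw [ih (c :: cur) acc]

theorem pv_go_space (t : List Char) : ∀ (s cur : List Char) (acc : List (List Char)),
    PySem.Chars.split₀.go (s ++ ' ' :: t) cur acc
      = PySem.Chars.split₀.go s cur acc ++ PySem.Chars.split₀.go t [] [] := by
  intro s
  induction s with
  | nil =>
    intro cur acc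
    simp only [List.nil_append, PySem.Chars.split₀.go]
    have : PySem.Chars.isspace ' ' = true := by decide
    rw [if_pos this]
    split_ifs with h
    · rw [pv_go_acc t [] acc]
    · rw [pv_go_acc t [] (cur.reverse :: acc)]
      try simp
  | cons c rest ih =>
    intro cur acc
    simp only [List.cons_append, PySem.Chars.split₀.go]
    split_ifs with h1 h2
    · rw [ih [] acc]
    · rw [ih [] (cur.reverse :: acc)]
    · rw [ih (c :: cur) acc]

theorem pv_split_append_chars (s t : List Char) :
    PySem.Chars.split₀ (s ++ ' ' :: t) = PySem.Chars.split₀ s ++ PySem.Chars.split₀ t := by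
  simp only [PySem.Chars.split₀]
  exact pv_go_space t s [] []

theorem pv_split_append (p f : String) :
    PySem.Str.split₀ (p ++ " " ++ f) = PySem.Str.split₀ p ++ PySem.Str.split₀ f := by
  simp only [PySem.Str.split₀]
  have h : (p ++ " " ++ f).toList = p.toList ++ ' ' :: f.toList := by
    simp [String.toList_append]
  rw [h, pv_split_append_chars, List.map_append]

-- the word-list shadow of A's filler loop
def pvWloop (length_tokens : Int) (fw : List String) : Nat → List String → List String
  | 0, ws => ws
  | fuel + 1, ws =>
    if (ws.length : Int) < length_tokens then
      pvWloop length_tokens fw fuel (ws ++ fw)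
    else ws

theorem pv_fill_split (lt : Int) (filler : String) (fuel : Nat) (p : String) :
    PySem.Str.split₀ (pvA_fill lt filler fuel p)
      = pvWloop lt (PySem.Str.split₀ filler) fuel (PySem.Str.split₀ p) := by
  induction fuel generalizing p with
  | zero => rw [pvA_fill, pvWloop]
  | succ f ih =>
    rw [pvA_fill, pvWloop]
    by_cases h : ((PySem.Str.split₀ p).length : Int) < lt
    · rw [if_pos h, if_pos h, ih, pv_split_append]
    · rw [if_neg h, if_neg h]

-- closed form of the word loop: it appends exactly ⌈(lt - |ws|)/|fw|⌉ copies of fw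
theorem pv_wloop_eq (lt : Int) (fw : List String) (hfw : fw ≠ []) (fuel : Nat) :
    ∀ (ws : List String), lt ≤ (ws.length : Int) + fuel →
    pvWloop lt fw fuel ws =
      (if (ws.length : Int) < lt then
        ws ++ (List.replicate
          (-(PySem.Int.floordiv ((ws.length : Int) - lt) (fw.length : Int))).toNat fw).flatten
      else ws) := by
  have hm : 0 < (fw.length : Int) := by
    have := List.length_pos_iff.mpr hfw; exact_mod_cast this
  induction fuel with
  | zero =>
    intro ws hfuel
    rw [pvWloop, if_neg (by push_cast at hfuel ⊢; omega)]
  | succ f ih =>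
    intro ws hfuel
    rw [pvWloop]
    by_cases h : (ws.length : Int) < lt
    · rw [if_pos h, if_pos h]
      rw [ih (ws ++ fw) (by rw [List.length_append]; push_cast at hfuel ⊢; omega)]
      have hlen : ((ws ++ fw).length : Int) = (ws.length : Int) + (fw.length : Int) := by
        rw [List.length_append]; push_cast; ring
      rw [hlen]
      set n := (ws.length : Int)
      set m := (fw.length : Int)
      by_cases h2 : n + m < lt
      · rw [if_pos h2]
        have hdiv : PySem.Int.floordiv (n + m - lt) m = PySem.Int.floordiv (n - lt) m + 1 := by
          rw [PySem.Int.floordiv_eq_ediv_of_pos hm, PySem.Int.floordiv_eq_ediv_of_pos hm]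
          have : n + m - lt = (n - lt) + 1 * m := by ring
          rw [this, Int.add_mul_ediv_right _ _ (by omega)]
        have hneg : PySem.Int.floordiv (n - lt) m ≤ -1 := by
          have h0 : PySem.Int.floordiv (n - lt) m < 0 :=
            (PySem.Int.floordiv_lt_iff_lt_mul hm).mpr (by rw [zero_mul]; omega)
          omega
        rw [hdiv]
        have hk : (-(PySem.Int.floordiv (n - lt) m)).toNat
            = (-(PySem.Int.floordiv (n - lt) m + 1)).toNat + 1 := by omega
        rw [hk, List.replicate_succ, List.flatten_cons, List.append_assoc]
      · rw [if_neg h2]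
        have hdiv : PySem.Int.floordiv (n - lt) m = -1 := by
          rw [PySem.Int.floordiv_eq_iff_of_pos hm]
          constructor <;> omega
        rw [hdiv]
        norm_num
    · rw [if_neg h, if_neg h]

theorem pv_make_eq (lt : Int) (i : Int) : pvA_make lt i = pvB_build lt i := by
  have h5 : PySem.Int.mod i 5 = 0 ∨ PySem.Int.mod i 5 = 1 ∨ PySem.Int.mod i 5 = 2 ∨
      PySem.Int.mod i 5 = 3 ∨ PySem.Int.mod i 5 = 4 := by
    have h1 := PySem.Int.mod_nonneg i (by norm_num : (0:Int) < 5)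
    have h2 := PySem.Int.mod_lt i (by norm_num : (0:Int) < 5)
    omega
  have hfw : PySem.Str.split₀ (PySem.List.pyGetD pvFillerPhrases (PySem.Int.mod i 5) "") ≠ [] := by
    rcases h5 with h | h | h | h | h <;> rw [h] <;> decide
  simp only [pvA_make, pvB_build]
  rw [pv_fill_split, pv_wloop_eq lt _ hfw lt.toNat _ (by omega)]

-- ===== VERDICT (by name: the statement is the Claim_ definition above) =====
theorem generate_length_prompts_spec : Claim_equal_generate_length_prompts := by
  intro n lt _
  unfold Spec_generate_length_prompts generate_length_prompts generate_length_prompts_alt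
  rw [PySem.List.foldl_append_singleton_eq_map]
  exact List.map_congr_left (fun i _ => pv_make_eq lt i)
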